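-- pv_equiv track=rewrite | github.com/Takesad/atcoder-practice.py | e-343.py | largest_palindromic_cube
-- ===== SOURCE A (Python) =====
-- def is_palindrome(n):
--     return str(n) == str(n)[::-1]  # 文字列で回文判定
--
-- def largest_palindromic_cube(N):
--     max_cube = 0
--     x = 1
--     while (cube := x ** 3) <= N:  # 立方数を計算しながら探索
--         if is_palindrome(cube):   # 回文なら最大値を更新
--             max_cube = cube
--         x += 1
--     return max_cube
-- ===== SOURCE B (Python) =====
-- def largest_palindromic_cube(N):
--     if N < 1:
--         return 0
--     # exact integer cube root: largest x >= 1 with x**3 <= N, by binary search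
--     lo, hi = 1, N
--     while lo < hi:
--         mid = (lo + hi + 1) // 2
--         if mid ** 3 <= N:
--             lo = mid
--         else:
--             hi = mid - 1
--     x = lo
--     while x > 0:
--         c = x ** 3
--         s = str(c)
--         if s == s[::-1]:
--             return c
--         x -= 1
--     return 0
-- ===== Notes on version B (the rewrite author's own statement) =====
-- stated objective: faster
-- what changed: B computes the exact integer cube root of N by binary search and then scans cubes DOWNWARD, returning the first palindromic cube (early exit), instead of A's upward scan of all cubes with a running maximum.
import Mathlib
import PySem

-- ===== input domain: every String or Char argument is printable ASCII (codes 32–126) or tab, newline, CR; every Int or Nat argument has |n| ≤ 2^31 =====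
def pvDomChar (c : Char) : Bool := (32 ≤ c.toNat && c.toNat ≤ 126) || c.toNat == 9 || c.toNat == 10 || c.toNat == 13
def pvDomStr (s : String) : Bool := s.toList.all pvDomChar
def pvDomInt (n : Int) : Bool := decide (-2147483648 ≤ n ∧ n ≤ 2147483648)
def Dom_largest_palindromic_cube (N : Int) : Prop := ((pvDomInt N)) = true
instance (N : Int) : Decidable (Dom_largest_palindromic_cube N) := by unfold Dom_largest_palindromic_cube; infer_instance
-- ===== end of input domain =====

-- B replaces A's full upward scan-with-maximum by an exact binary-search integer
-- cube root followed by a downward early-exit scan for the first palindromic cube.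


-- ===== PORT A =====
-- str(n) == str(n)[::-1]  (s[::-1] via PySem.Str.slice?; step -1 never yields none)
def is_palindrome (n : Int) : Bool :=
  match PySem.Str.slice? (PySem.Int.toStr n) none none (-1) with
  | some r => PySem.Int.toStr n == r
  | none => false

-- the while loop of A: x upward, max_cube accumulator
def loopA (N x acc : Int) : Int :=
  if x ^ 3 ≤ N then
    loopA N (x + 1) (if is_palindrome (x ^ 3) then x ^ 3 else acc)
  else acc
termination_by (max N 1 + 1 - x).toNat
decreasing_by
  rename_i h
  by_cases hx : x ≤ 1
  · omega
  · have : x ≤ x ^ 3 := by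
      nlinarith [mul_nonneg (mul_nonneg (show (0:Int) ≤ x by omega) (show (0:Int) ≤ x - 1 by omega)) (show (0:Int) ≤ x + 1 by omega)]
    omega

def largest_palindromic_cube (N : Int) : Int := loopA N 1 0

-- ===== PORT B =====
-- binary search: largest x in [lo, hi] with x**3 <= N (invariants supplied at call)
def icbrtLoop (N lo hi : Int) : Int :=
  if h : lo < hi then
    let mid := PySem.Int.floordiv (lo + hi + 1) 2
    if mid ^ 3 ≤ N then icbrtLoop N mid hi else icbrtLoop N lo (mid - 1)
  else lo
termination_by (hi - lo).toNat
decreasing_by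
  all_goals
    have hm : PySem.Int.floordiv (lo + hi + 1) 2 = (lo + hi + 1) / 2 :=
      PySem.Int.floordiv_eq_ediv_of_pos (by norm_num)
    omega

-- the downward while loop of B: first palindromic cube, else 0
def goB (x : Int) : Int :=
  if h : 0 < x then
    if is_palindrome (x ^ 3) then x ^ 3 else goB (x - 1)
  else 0
termination_by x.toNat
decreasing_by omega

def largest_palindromic_cube_alt (N : Int) : Int :=
  if N < 1 then 0 else goB (icbrtLoop N 1 N)

-- ===== PRECONDITION & SPEC =====
def Spec_largest_palindromic_cube (N : Int) (out : Int) : Prop := out = largest_palindromic_cube_alt N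
instance (N : Int) (out : Int) : Decidable (Spec_largest_palindromic_cube N out) := by unfold Spec_largest_palindromic_cube; infer_instance

-- ===== CLAIM (what is proved, stated in full; the proofs are below) =====
def Claim_equal_largest_palindromic_cube : Prop := ∀ (N : Int), Dom_largest_palindromic_cube N → Spec_largest_palindromic_cube N (largest_palindromic_cube N)

-- ===== LEMMAS AND PROOFS =====

-- proof-side downward scan from j to lower bound lo, falling back to acc
def dsc (lo acc j : Int) : Int :=
  if j < lo then acc
  else if is_palindrome (j ^ 3) then j ^ 3 else dsc lo acc (j - 1)
termination_by (j - lo + 1).toNat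
decreasing_by omega

lemma cube_le_cube {a b : Int} (_ha : 0 ≤ a) (h : a ≤ b) : a ^ 3 ≤ b ^ 3 := by
  nlinarith [sq_nonneg a, sq_nonneg b, sq_nonneg (a + b)]

lemma goB_eq_dsc : ∀ (k : Nat) (j : Int), j.toNat = k → goB j = dsc 1 0 j := by
  intro k
  induction k using Nat.strong_induction_on with
  | _ k ih =>
    intro j hk
    rw [goB.eq_def, dsc.eq_def]
    by_cases hj : 0 < j
    · have h2 : ¬ j < 1 := by omega
      simp only [hj, dif_pos, h2, if_false]
      split
      · rfl
      · exact ih (j - 1).toNat (by omega) (j - 1) rfl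
    · have h2 : j < 1 := by omega
      simp [hj, h2]

lemma dsc_step (x acc : Int) :
    ∀ (k : Nat) (j : Int), (j - x).toNat = k → x ≤ j →
      dsc x acc j = dsc (x + 1) (if is_palindrome (x ^ 3) then x ^ 3 else acc) j := by
  intro k
  induction k using Nat.strong_induction_on with
  | _ k ih =>
    intro j hk hxj
    rw [dsc.eq_def, dsc.eq_def (lo := x + 1)]
    by_cases hej : j = x
    · subst hej
      have h1 : ¬ j < j := by omega
      have h2 : j < j + 1 := by omega
      simp only [h1, if_false, h2, if_pos]
      split
      · rfl
      · rw [dsc.eq_def]; simp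
    · have h1 : ¬ (j < x) := by omega
      have h2 : ¬ (j < x + 1) := by omega
      simp only [h1, h2, if_false]
      split
      · rfl
      · exact ih (j - 1 - x).toNat (by omega) (j - 1) rfl (by omega)

lemma icbrt_spec (N : Int) :
    ∀ (k : Nat) (lo hi : Int), (hi - lo).toNat = k → 1 ≤ lo → lo ≤ hi →
      lo ^ 3 ≤ N → N < (hi + 1) ^ 3 →
      1 ≤ icbrtLoop N lo hi ∧ (icbrtLoop N lo hi) ^ 3 ≤ N ∧ N < (icbrtLoop N lo hi + 1) ^ 3 := by
  intro k
  induction k using Nat.strong_induction_on with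
  | _ k ih =>
    intro lo hi hk h1 h2 h3 h4
    rw [icbrtLoop.eq_def]
    by_cases hlt : lo < hi
    · have hm : PySem.Int.floordiv (lo + hi + 1) 2 = (lo + hi + 1) / 2 :=
        PySem.Int.floordiv_eq_ediv_of_pos (by norm_num)
      set mid := PySem.Int.floordiv (lo + hi + 1) 2 with hmid
      have hb1 : lo + 1 ≤ mid := by omega
      have hb2 : mid ≤ hi := by omega
      simp only [hlt, dif_pos]
      by_cases hc : mid ^ 3 ≤ N
      · simp only [hc, if_pos]
        exact ih (hi - mid).toNat (by omega) mid hi rfl (by omega) hb2 hc h4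
      · simp only [hc, if_false]
        have hlt2 : N < (mid - 1 + 1) ^ 3 := by
          have : N < mid ^ 3 := by omega
          simpa using this
        exact ih (mid - 1 - lo).toNat (by omega) lo (mid - 1) rfl h1 (by omega) h3 hlt2
    · have heq : lo = hi := by omega
      simp only [hlt, dif_neg, not_false_iff]
      exact ⟨h1, h3, by rw [heq]; exact h4⟩

lemma loopA_eq_dsc (N r : Int) (hr : 1 ≤ r) (h1 : r ^ 3 ≤ N) (h2 : N < (r + 1) ^ 3) :
    ∀ (k : Nat) (x acc : Int), (r + 1 - x).toNat = k → 1 ≤ x →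
      loopA N x acc = dsc x acc r := by
  intro k
  induction k using Nat.strong_induction_on with
  | _ k ih =>
    intro x acc hk hx
    rw [loopA.eq_def]
    by_cases hxr : x ≤ r
    · have hcle : x ^ 3 ≤ N := le_trans (cube_le_cube (by omega) hxr) h1
      simp only [hcle, if_pos]
      rw [ih (r + 1 - (x + 1)).toNat (by omega) (x + 1) _ rfl (by omega)]
      exact (dsc_step x acc (r - x).toNat r rfl hxr).symm
    · have hgt : ¬ x ^ 3 ≤ N := by
        have : (r + 1) ^ 3 ≤ x ^ 3 := cube_le_cube (by omega) (by omega)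
        intro hcon; linarith
      simp only [hgt, if_false]
      rw [dsc.eq_def]
      simp [show r < x by omega]

-- ===== VERDICT (by name: the statement is the Claim_ definition above) =====
theorem largest_palindromic_cube_spec : Claim_equal_largest_palindromic_cube := by
  intro N _
  unfold Spec_largest_palindromic_cube largest_palindromic_cube largest_palindromic_cube_alt
  by_cases hN : N < 1
  · rw [loopA.eq_def]
    have h1 : ¬ (1 : Int) ^ 3 ≤ N := by simpa using (by omega : ¬ (1 : Int) ≤ N)
    simp [hN]
  · have hN1 : 1 ≤ N := by omega
    have hub : N < (N + 1) ^ 3 := by nlinarith [sq_nonneg N, sq_nonneg (N + 1)]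
    have hsp := icbrt_spec N (N - 1).toNat 1 N rfl le_rfl hN1 (by simpa using hN1) hub
    obtain ⟨hr1, hr2, hr3⟩ := hsp
    rw [loopA_eq_dsc N (icbrtLoop N 1 N) hr1 hr2 hr3 (icbrtLoop N 1 N + 1 - 1).toNat 1 0 rfl le_rfl]
    rw [← goB_eq_dsc (icbrtLoop N 1 N).toNat (icbrtLoop N 1 N) rfl]
    simp [hN]
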